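-- pv_equiv track=rewrite | github.com/IssacandLi/structured_ABD | sampling_diagnostics.py | _trim_token_ids
-- ===== SOURCE A (Python) =====
-- def _trim_token_ids(token_ids, eos_token_id=None, pad_token_id=None):
--   trimmed = []
--   for token_id in token_ids:
--     if token_id is None:
--       continue
--     token_id = int(token_id)
--     if pad_token_id is not None and token_id == pad_token_id:
--       continue
--     if eos_token_id is not None and token_id == eos_token_id:
--       break
--     trimmed.append(token_id)
--   return trimmed
-- ===== SOURCE B (Python) =====
-- def _trim_token_ids(token_ids, eos_token_id=None, pad_token_id=None):
--     cleaned = [int(t) for t in token_ids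
--                if t is not None and (pad_token_id is None or int(t) != pad_token_id)]
--     if eos_token_id is None:
--         return cleaned
--     try:
--         return cleaned[:cleaned.index(eos_token_id)]
--     except ValueError:
--         return cleaned
-- ===== Notes on version B (the rewrite author's own statement) =====
-- stated objective: alternative
-- what changed: Instead of one early-breaking loop, B first materialises the cleaned list (Nones and pad dropped), then locates the eos cutoff with list.index and returns a slice up to it (whole list if absent).
import Mathlib
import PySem

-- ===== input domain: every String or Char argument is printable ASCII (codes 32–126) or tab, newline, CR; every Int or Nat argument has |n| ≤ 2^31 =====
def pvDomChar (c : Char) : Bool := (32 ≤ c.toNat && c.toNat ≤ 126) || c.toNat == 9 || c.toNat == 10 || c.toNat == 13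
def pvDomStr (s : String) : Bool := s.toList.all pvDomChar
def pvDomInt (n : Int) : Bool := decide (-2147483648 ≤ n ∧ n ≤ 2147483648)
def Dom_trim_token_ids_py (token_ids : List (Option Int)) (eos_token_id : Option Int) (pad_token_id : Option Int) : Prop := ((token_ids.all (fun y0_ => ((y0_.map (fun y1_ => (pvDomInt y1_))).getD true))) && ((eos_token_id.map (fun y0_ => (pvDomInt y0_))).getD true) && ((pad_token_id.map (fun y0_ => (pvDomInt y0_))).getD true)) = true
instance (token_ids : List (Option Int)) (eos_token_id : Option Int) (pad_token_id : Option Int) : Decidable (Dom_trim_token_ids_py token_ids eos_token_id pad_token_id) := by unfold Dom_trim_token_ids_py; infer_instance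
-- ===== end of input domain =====

-- ===== PORT A =====
-- A: one early-breaking loop that skips None, skips pad (continue), stops at eos (break), else appends.
def trim_token_ids_py (token_ids : List (Option Int)) (eos_token_id : Option Int) (pad_token_id : Option Int) : List Int :=
  match token_ids with
  | [] => []
  | none :: rest => trim_token_ids_py rest eos_token_id pad_token_id
  | some t :: rest =>
    if pad_token_id = some t then  -- pad is not None and token_id == pad
      trim_token_ids_py rest eos_token_id pad_token_id
    else if eos_token_id = some t then  -- eos is not None and token_id == eos
      []
    else
      t :: trim_token_ids_py rest eos_token_id pad_token_id

-- ===== PORT B =====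
-- B: materialise the cleaned list (Nones and pad dropped), then list.index the eos and slice up to it.
def trim_token_ids_py_alt (token_ids : List (Option Int)) (eos_token_id : Option Int) (pad_token_id : Option Int) : List Int :=
  let cleaned := token_ids.filterMap (fun t =>
    match t with
    | none => none
    | some v =>
      match pad_token_id with
      | none => some v
      | some p => if v ≠ p then some v else none)
  match eos_token_id with
  | none => cleaned
  | some e =>
    match PySem.List.index? cleaned e with
    | some i => cleaned.take i      -- cleaned[:cleaned.index(eos)]
    | none => cleaned               -- ValueError: eos absent

-- ===== PRECONDITION & SPEC =====

def Spec_trim_token_ids_py (token_ids : List (Option Int)) (eos_token_id : Option Int) (pad_token_id : Option Int) (out : List Int) : Prop := out = trim_token_ids_py_alt token_ids eos_token_id pad_token_id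
instance (token_ids : List (Option Int)) (eos_token_id : Option Int) (pad_token_id : Option Int) (out : List Int) : Decidable (Spec_trim_token_ids_py token_ids eos_token_id pad_token_id out) := by unfold Spec_trim_token_ids_py; infer_instance

-- ===== CLAIM =====
def Claim_equal_trim_token_ids_py : Prop := ∀ (token_ids : List (Option Int)) (eos_token_id : Option Int) (pad_token_id : Option Int), Dom_trim_token_ids_py token_ids eos_token_id pad_token_id → Spec_trim_token_ids_py token_ids eos_token_id pad_token_id (trim_token_ids_py token_ids eos_token_id pad_token_id)

-- ===== LEMMAS AND PROOFS =====

def cleanList (pad_token_id : Option Int) (l : List (Option Int)) : List Int :=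
  l.filterMap (fun t =>
    match t with
    | none => none
    | some v =>
      match pad_token_id with
      | none => some v
      | some p => if v ≠ p then some v else none)

-- slicing at the first index of e is exactly takeWhile (· ≠ e)
theorem take_index_eq_takeWhile (l : List Int) (e : Int) :
    (match PySem.List.index? l e with
     | some i => l.take i
     | none => l) = l.takeWhile (fun t => t ≠ e) := by
  simp only [PySem.List.index?_eq_idxOf?]
  induction l with
  | nil => simp
  | cons x xs ih =>
    by_cases hx : x = e
    · subst hx; simp [List.idxOf?_cons]
    · simp only [List.idxOf?_cons, beq_iff_eq, hx, ite_false]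
      cases h : List.idxOf? e xs with
      | none => rw [h] at ih; rw [List.takeWhile_cons]; simp [hx]; simpa using ih
      | some i => rw [h] at ih; rw [List.takeWhile_cons]; simp [hx]; simpa using ih

theorem alt_eq_takeWhile (token_ids : List (Option Int)) (eos_token_id : Option Int) (pad_token_id : Option Int) :
    trim_token_ids_py_alt token_ids eos_token_id pad_token_id =
      (match eos_token_id with
       | none => cleanList pad_token_id token_ids
       | some e => (cleanList pad_token_id token_ids).takeWhile (fun t => t ≠ e)) := by
  cases eos_token_id with
  | none => rfl
  | some e =>
    show (match PySem.List.index? (cleanList pad_token_id token_ids) e with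
          | some i => (cleanList pad_token_id token_ids).take i
          | none => cleanList pad_token_id token_ids) = _
    exact take_index_eq_takeWhile _ e

theorem trim_eq_alt (token_ids : List (Option Int)) (eos_token_id : Option Int) (pad_token_id : Option Int) :
    trim_token_ids_py token_ids eos_token_id pad_token_id = trim_token_ids_py_alt token_ids eos_token_id pad_token_id := by
  rw [alt_eq_takeWhile]
  induction token_ids with
  | nil => cases eos_token_id <;> simp [trim_token_ids_py, cleanList]
  | cons hd rest ih =>
    cases hd with
    | none => simpa [trim_token_ids_py, cleanList] using ih
    | some t =>
      cases eos_token_id with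
      | none =>
        cases pad_token_id with
        | none => simp [trim_token_ids_py, cleanList, ih]
        | some p =>
          by_cases hp : p = t
          · subst hp; simpa [trim_token_ids_py, cleanList] using ih
          · simp only [cleanList, List.filterMap_cons] at ih ⊢
            simp [trim_token_ids_py, hp, Ne.symm hp, ih]
      | some e =>
        cases pad_token_id with
        | none =>
          by_cases he : e = t
          · subst he; simp [trim_token_ids_py, cleanList, List.takeWhile_cons]
          · simp only [cleanList, List.filterMap_cons] at ih ⊢
            simp [trim_token_ids_py, he, Ne.symm he, List.takeWhile_cons, ih]
        | some p =>
          by_cases hp : p = t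
          · subst hp
            simp only [cleanList, List.filterMap_cons] at ih ⊢
            simpa [trim_token_ids_py] using ih
          · by_cases he : e = t
            · subst he
              simp only [cleanList, List.filterMap_cons] at ih ⊢
              simp [trim_token_ids_py, hp, Ne.symm hp, List.takeWhile_cons]
            · simp only [cleanList, List.filterMap_cons] at ih ⊢
              simp [trim_token_ids_py, hp, he, Ne.symm hp, Ne.symm he, List.takeWhile_cons, ih]

-- ===== VERDICT =====
theorem trim_token_ids_py_spec : Claim_equal_trim_token_ids_py := by
  intro ts e p _
  unfold Spec_trim_token_ids_py
  exact trim_eq_alt ts e p
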